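-- pv_equiv track=rewrite | github.com/cdmaher/adv_of_code_2021 | day13/day13.py | foldLeft
-- ===== SOURCE A (Python) =====
-- def foldLeft(grid, line):
--     newGrid = []
--     for y in range(len(grid)):
--         newGrid.append([])
--         for x in range(line):
--             newGrid[y].append(grid[y][x])
--     for y in range(len(grid)):
--         for x in range(line + 1, len(grid[y])):
--             mirrorX = line - abs(line - x)
--             if mirrorX >= 0 and grid[y][x] == "#":
--                 newGrid[y][mirrorX] = grid[y][x]
--     return newGrid
-- ===== SOURCE B (Python) =====
-- def foldLeft(grid, line):
--     # Build each output row in one pass over the kept columns, pulling the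
--     # mirrored cell from the right half instead of pushing it in a second pass.
--     result = []
--     for row in grid:
--         n = len(row)
--         result.append(['#' if 2 * line - x < n and row[2 * line - x] == '#' else row[x]
--                        for x in range(line)])
--     return result
-- ===== Notes on version B (the rewrite author's own statement) =====
-- stated objective: simpler
-- what changed: Instead of A's two passes (copy the left half, then scan the right half pushing '#' to mirror positions via in-place overwrite), B builds each output row in a single pass over the kept columns, pulling the mirrored cell 2*line-x from the right half directly.
import Mathlib
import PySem

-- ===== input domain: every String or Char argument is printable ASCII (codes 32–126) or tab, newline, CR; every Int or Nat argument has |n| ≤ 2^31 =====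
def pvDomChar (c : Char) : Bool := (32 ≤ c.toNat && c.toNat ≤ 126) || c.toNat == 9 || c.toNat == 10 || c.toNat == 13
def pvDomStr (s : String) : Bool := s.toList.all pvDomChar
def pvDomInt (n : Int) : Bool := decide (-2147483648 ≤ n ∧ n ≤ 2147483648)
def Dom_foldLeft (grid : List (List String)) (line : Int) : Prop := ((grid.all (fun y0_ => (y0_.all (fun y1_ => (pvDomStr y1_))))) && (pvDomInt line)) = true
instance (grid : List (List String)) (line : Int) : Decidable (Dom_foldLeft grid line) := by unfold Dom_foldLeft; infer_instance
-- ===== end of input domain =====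

-- B fuses A's copy-then-overwrite two passes into one pass per row that pulls the
-- mirrored cell from the right half; equal return values on Pre_ (where A does not raise).

-- ===== PORT A =====
-- first inner loop: for x in range(line): newGrid[y].append(grid[y][x])
def pvPass1Row (row : List String) (line : Int) : List String :=
  (PySem.List.pyRange 0 line 1).foldl (fun acc x => acc ++ [PySem.List.pyGetD row x ""]) []

-- body of the second inner loop (one x)
def pvStepA (row : List String) (line : Int) (acc : List String) (x : Int) : List String :=
  -- mirrorX = line - abs(line - x), written inline
  if 0 ≤ line - |line - x| ∧ PySem.List.pyGetD row x "" = "#"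
  then PySem.List.pySetD acc (line - |line - x|) (PySem.List.pyGetD row x "")
  else acc

-- second inner loop: for x in range(line+1, len(grid[y])): …
def pvPass2Row (row : List String) (line : Int) (nrow : List String) : List String :=
  (PySem.List.pyRange (line + 1) (row.length : Int) 1).foldl (pvStepA row line) nrow

def foldLeft (grid : List (List String)) (line : Int) : List (List String) :=
  let newGrid := grid.foldl (fun acc row => acc ++ [pvPass1Row row line]) []
  (PySem.List.pyRange 0 (grid.length : Int) 1).foldl
    (fun ng y => PySem.List.pySetD ng y
      (pvPass2Row (PySem.List.pyGetD grid y []) line (PySem.List.pyGetD ng y []))) newGrid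

-- ===== PORT B =====
def pvFoldRowB (row : List String) (line : Int) : List String :=
  (PySem.List.pyRange 0 line 1).map (fun x =>
    if 2 * line - x < (row.length : Int) ∧ PySem.List.pyGetD row (2 * line - x) "" = "#"
    then "#" else PySem.List.pyGetD row x "")

def foldLeft_alt (grid : List (List String)) (line : Int) : List (List String) :=
  grid.map (fun row => pvFoldRowB row line)

-- ===== PRECONDITION & SPEC =====
-- Pre_ excludes exactly the inputs where Python A raises IndexError: a row shorter than line
-- (the first pass reads grid[y][x] for every x in range(line)).
def Pre_foldLeft (grid : List (List String)) (line : Int) : Prop :=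
  ∀ row ∈ grid, line ≤ (row.length : Int)
instance (grid : List (List String)) (line : Int) : Decidable (Pre_foldLeft grid line) := by
  unfold Pre_foldLeft; infer_instance

def pvWitness_foldLeft : List (List String) × Int := ([[".", "#", "."], ["#", ".", "#"]], 1)

def Spec_foldLeft (grid : List (List String)) (line : Int) (out : List (List String)) : Prop := out = foldLeft_alt grid line
instance (grid : List (List String)) (line : Int) (out : List (List String)) : Decidable (Spec_foldLeft grid line out) := by unfold Spec_foldLeft; infer_instance

-- ===== CLAIM (what is proved, stated in full; the proofs are below) =====
def Claim_equal_foldLeft : Prop := ∀ (grid : List (List String)) (line : Int), Dom_foldLeft grid line → Pre_foldLeft grid line → Spec_foldLeft grid line (foldLeft grid line)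

-- ===== LEMMAS AND PROOFS =====

theorem pvStepA_length (row : List String) (line : Int) (acc : List String) (x : Int) :
    (pvStepA row line acc x).length = acc.length := by
  unfold pvStepA
  split <;> simp [PySem.List.length_pySetD]

-- the whole-grid second loop sets each index once, in order
theorem pvSetLoop (g : List String → List String → List String) (G : List (List String)) :
    ∀ (bs cs : List (List String)), cs.length + bs.length = G.length →
      (PySem.List.pyRange (cs.length : Int) (G.length : Int) 1).foldl
        (fun ng y => PySem.List.pySetD ng y (g (PySem.List.pyGetD G y []) (PySem.List.pyGetD ng y [])))
        (cs ++ bs)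
      = cs ++ List.zipWith g (G.drop cs.length) bs := by
  intro bs
  induction bs with
  | nil =>
    intro cs h
    simp only [List.length_nil] at h
    rw [PySem.List.pyRange_one_eq_nil (by omega)]
    simp
  | cons b bs ih =>
    intro cs h
    have hk : cs.length < G.length := by simp at h; omega
    rw [PySem.List.pyRange_one_cons (by exact_mod_cast hk)]
    simp only [List.foldl_cons]
    have hget : PySem.List.pyGetD (cs ++ b :: bs) (cs.length : Int) [] = b := by
      simp [PySem.List.pyGetD_natCast, List.getD]
    have hset : PySem.List.pySetD (cs ++ b :: bs) (cs.length : Int)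
        (g (PySem.List.pyGetD G (cs.length : Int) []) b)
        = (cs ++ [g (PySem.List.pyGetD G (cs.length : Int) []) b]) ++ bs := by
      rw [PySem.List.pySetD_natCast]
      rw [List.set_append]
      simp
    rw [hget, hset]
    have h1 : ((cs ++ [g (PySem.List.pyGetD G (cs.length : Int) []) b]).length : Int)
        = (cs.length : Int) + 1 := by simp
    rw [← h1, ih _ (by simp at h ⊢; omega)]
    have hdrop : G.drop cs.length = G[cs.length] :: G.drop (cs.length + 1) :=
      List.drop_eq_getElem_cons hk
    have hG : PySem.List.pyGetD G (cs.length : Int) [] = G[cs.length] := by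
      simp [PySem.List.pyGetD_natCast, List.getD, List.getElem?_eq_getElem hk]
    rw [hdrop, List.zipWith_cons_cons, hG]
    simp

-- characterisation of the second-pass fold at position k
theorem pvStepGet (row : List String) (line : Int) (k : Nat) :
    ∀ (L : List Int) (acc : List String),
      (∀ x ∈ L, line + 1 ≤ x) →
      (∀ x ∈ L, 2 * line - x < (acc.length : Int)) →
      (L.foldl (pvStepA row line) acc)[k]? =
        if ∃ x ∈ L, PySem.List.pyGetD row x "" = "#" ∧ 2 * line - x = (k : Int)
        then some "#" else acc[k]? := by
  intro L
  induction L with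
  | nil => intro acc _ _; simp
  | cons x L ih =>
    intro acc hL hlen
    simp only [List.foldl_cons]
    have hx1 : line + 1 ≤ x := hL x (by simp)
    have hmir : line - |line - x| = 2 * line - x := by
      rw [abs_of_nonpos (by omega)]; ring
    have hstepLen : (pvStepA row line acc x).length = acc.length := pvStepA_length ..
    rw [ih _ (fun y hy => hL y (by simp [hy])) (fun y hy => by
      rw [hstepLen]; exact hlen y (by simp [hy]))]
    by_cases hx : PySem.List.pyGetD row x "" = "#" ∧ 2 * line - x = (k : Int)
    · obtain ⟨hp, hxk⟩ := hx
      have hstep : pvStepA row line acc x = acc.set k "#" := by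
        unfold pvStepA
        rw [if_pos ⟨by rw [hmir]; omega, hp⟩, hp,
            PySem.List.pySetD_of_nonneg acc _ (by rw [hmir]; omega)]
        congr 1
        rw [hmir]; omega
      have hklen : k < acc.length := by
        have := hlen x (by simp); omega
      by_cases hL2 : ∃ y ∈ L, PySem.List.pyGetD row y "" = "#" ∧ 2 * line - y = (k : Int)
      · rw [if_pos hL2, if_pos ⟨x, List.mem_cons_self, hp, hxk⟩]
      · rw [if_neg hL2, if_pos ⟨x, List.mem_cons_self, hp, hxk⟩, hstep,
            List.getElem?_set_self hklen]
    · have hsame : (pvStepA row line acc x)[k]? = acc[k]? := by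
        unfold pvStepA
        split
        · rename_i hcond
          rw [hmir] at hcond
          have hne : 2 * line - x ≠ (k : Int) := by
            intro hkeq; exact hx ⟨hcond.2, hkeq⟩
          rw [PySem.List.pySetD_of_nonneg acc _ (by rw [hmir]; omega), hmir,
              List.getElem?_set_ne (by omega)]
        · rfl
      rw [hsame]
      have : (∃ y ∈ x :: L, PySem.List.pyGetD row y "" = "#" ∧ 2 * line - y = (k : Int))
           ↔ (∃ y ∈ L, PySem.List.pyGetD row y "" = "#" ∧ 2 * line - y = (k : Int)) := by
        constructor
        · rintro ⟨y, hy, hp⟩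
          rcases List.mem_cons.mp hy with rfl | hy'
          · exact absurd hp hx
          · exact ⟨y, hy', hp⟩
        · rintro ⟨y, hy, hp⟩; exact ⟨y, by simp [hy], hp⟩
      rw [if_congr this rfl rfl]

theorem pvPass1_eq_map (row : List String) (line : Int) :
    pvPass1Row row line = (PySem.List.pyRange 0 line 1).map (fun x => PySem.List.pyGetD row x "") := by
  unfold pvPass1Row
  rw [PySem.List.foldl_append_singleton_eq_map]
  simp

-- per-row equality (holds for every row and line)
theorem pvRowEq (row : List String) (line : Int) :
    pvPass2Row row line (pvPass1Row row line) = pvFoldRowB row line := by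
  have hlen1 : (pvPass1Row row line).length = line.toNat := by
    rw [pvPass1_eq_map]
    simp [PySem.List.length_pyRange_one]
  apply List.ext_getElem?
  intro k
  unfold pvPass2Row
  rw [pvStepGet row line k _ _
      (fun x hx => ((PySem.List.mem_pyRange_one).mp hx).1)
      (fun x hx => by
        have := ((PySem.List.mem_pyRange_one).mp hx).1
        rw [hlen1]; omega)]
  by_cases hk : k < line.toNat
  · have hkl : (k : Int) < line := by omega
    have hex : (∃ x ∈ PySem.List.pyRange (line + 1) (row.length : Int) 1,
          PySem.List.pyGetD row x "" = "#" ∧ 2 * line - x = (k : Int))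
        ↔ (2 * line - (k : Int) < (row.length : Int)
            ∧ PySem.List.pyGetD row (2 * line - (k : Int)) "" = "#") := by
      constructor
      · rintro ⟨x, hx, hp, hxk⟩
        have hm := (PySem.List.mem_pyRange_one).mp hx
        have hxe : x = 2 * line - (k : Int) := by omega
        subst hxe
        exact ⟨hm.2, hp⟩
      · rintro ⟨h1, h2⟩
        exact ⟨2 * line - (k : Int),
          (PySem.List.mem_pyRange_one).mpr ⟨by omega, by omega⟩, h2, by ring⟩
    rw [if_congr hex rfl rfl]
    have hB : (pvFoldRowB row line)[k]? = some (if 2 * line - (0 + (k : Int)) < (row.length : Int)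
          ∧ PySem.List.pyGetD row (2 * line - (0 + (k : Int))) "" = "#"
        then "#" else PySem.List.pyGetD row (0 + (k : Int)) "") := by
      unfold pvFoldRowB
      rw [List.getElem?_map, PySem.List.getElem?_pyRange_one]
      rw [if_pos (by simp; omega)]
      simp
    rw [hB]
    have hA : (pvPass1Row row line)[k]? = some (PySem.List.pyGetD row (0 + (k : Int)) "") := by
      rw [pvPass1_eq_map, List.getElem?_map, PySem.List.getElem?_pyRange_one]
      rw [if_pos (by simp; omega)]
      simp
    rw [hA]
    simp only [zero_add]
    split <;> rfl
  · have hnone1 : (pvPass1Row row line)[k]? = none := by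
      rw [List.getElem?_eq_none]; omega
    have hnone2 : (pvFoldRowB row line)[k]? = none := by
      rw [List.getElem?_eq_none]
      unfold pvFoldRowB
      simp [PySem.List.length_pyRange_one]; omega
    rw [hnone1, hnone2, if_neg]
    rintro ⟨x, hx, _, hxk⟩
    have hm := (PySem.List.mem_pyRange_one).mp hx
    omega

-- ===== VERDICT (by name: the statement is the Claim_ definition above) =====
theorem foldLeft_spec : Claim_equal_foldLeft := by
  intro grid line _ _
  unfold Spec_foldLeft foldLeft foldLeft_alt
  rw [PySem.List.foldl_append_singleton_eq_map]
  simp only [List.nil_append]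
  have h0 : (0 : Int) = (([] : List (List String)).length : Int) := by simp
  rw [h0, show grid.map (fun row => pvPass1Row row line)
        = [] ++ grid.map (fun row => pvPass1Row row line) from rfl,
      pvSetLoop (fun row nrow => pvPass2Row row line nrow) grid _ [] (by simp)]
  simp only [List.length_nil, List.drop_zero, List.nil_append]
  rw [List.zipWith_map_right, List.zipWith_self]
  exact (List.map_congr_left fun row _ => pvRowEq row line)
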